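-- pv_equiv track=rewrite | github.com/Carlinsj/Cse-4256 | Assignment_2.py | every_other_column
-- ===== SOURCE A (Python) =====
-- def every_other_column(m, n):
--     matrix = [[0 for _ in range(n)] for _ in range(m)]
--     num = 1
--     for j in range(0, n, 2):
--         for i in range(m):
--             matrix[i][j] = num
--             num += 1
--     return matrix
-- ===== SOURCE B (Python) =====
-- def every_other_column(m, n):
--     # Closed formula per cell: even column j is the (j//2)-th numbered column,
--     # which starts at (j//2)*m + 1 and counts down the rows.
--     return [[(j // 2) * m + i + 1 if j % 2 == 0 else 0 for j in range(n)]
--             for i in range(m)]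
-- ===== Notes on version B (the rewrite author's own statement) =====
-- stated objective: simpler
-- what changed: Replaced the mutate-in-place matrix with a running counter and column-first double loop by a single nested comprehension computing each cell independently from the closed formula (j//2)*m + i + 1 for even j, 0 for odd j.
import Mathlib
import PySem

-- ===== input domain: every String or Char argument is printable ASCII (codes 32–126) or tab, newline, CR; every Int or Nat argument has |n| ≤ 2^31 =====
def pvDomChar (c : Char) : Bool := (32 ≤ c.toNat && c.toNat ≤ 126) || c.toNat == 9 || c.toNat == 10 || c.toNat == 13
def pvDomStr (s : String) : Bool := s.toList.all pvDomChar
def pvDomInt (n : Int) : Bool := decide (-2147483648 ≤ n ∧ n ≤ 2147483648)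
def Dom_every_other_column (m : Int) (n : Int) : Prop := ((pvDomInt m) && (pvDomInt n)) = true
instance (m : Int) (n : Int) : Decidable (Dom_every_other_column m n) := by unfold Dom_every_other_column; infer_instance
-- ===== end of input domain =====

-- B replaces A's mutate-in-place matrix with a running counter by a nested
-- comprehension computing each cell from the closed formula (j//2)*m+i+1 (simpler).

-- ===== PORT A =====
-- matrix[i][j] = num; num += 1 — ported as folds carrying (matrix, num);
-- indices produced by range are nonnegative, so .toNat is exact here.
def every_other_column (m : Int) (n : Int) : List (List Int) :=
  let matrix : List (List Int) :=
    (PySem.List.pyRange 0 m 1).map (fun _ => (PySem.List.pyRange 0 n 1).map (fun _ => (0 : Int)))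
  let st :=
    (PySem.List.pyRange 0 n 2).foldl
      (fun (st : List (List Int) × Int) j =>
        (PySem.List.pyRange 0 m 1).foldl
          (fun (st2 : List (List Int) × Int) i =>
            (st2.1.set i.toNat ((st2.1.getD i.toNat []).set j.toNat st2.2), st2.2 + 1))
          st)
      (matrix, 1)
  st.1

-- ===== PORT B =====
def every_other_column_alt (m : Int) (n : Int) : List (List Int) :=
  (PySem.List.pyRange 0 m 1).map (fun i =>
    (PySem.List.pyRange 0 n 1).map (fun j =>
      if PySem.Int.mod j 2 = 0 then PySem.Int.floordiv j 2 * m + i + 1 else 0))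

-- ===== PRECONDITION & SPEC =====
def Spec_every_other_column (m : Int) (n : Int) (out : List (List Int)) : Prop := out = every_other_column_alt m n
instance (m : Int) (n : Int) (out : List (List Int)) : Decidable (Spec_every_other_column m n out) := by unfold Spec_every_other_column; infer_instance

-- ===== CLAIM (what is proved, stated in full; the proofs are below) =====
def Claim_equal_every_other_column : Prop := ∀ (m : Int) (n : Int), Dom_every_other_column m n → Spec_every_other_column m n (every_other_column m n)

-- ===== LEMMAS AND PROOFS =====

-- set on a range-indexed map stays a range-indexed map (out-of-range set is the identity)
theorem pv_set_map_range {α : Type} (N : Nat) (h : Nat → α) (p : Nat) (v : α) :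
    ((List.range N).map h).set p v = (List.range N).map (fun j => if j = p then v else h j) := by
  apply List.ext_getElem
  · simp
  · intro i h1 h2
    simp only [List.getElem_set, List.getElem_map, List.getElem_range]
    by_cases hpi : p = i
    · subst hpi; simp
    · rw [if_neg hpi, if_neg (fun h' => hpi h'.symm)]

-- inner loop: sets entry jn of each of the first K rows to num + row-index
theorem pv_inner (jn : Nat) (M : Nat) (K : Nat) (hK : K ≤ M) (f : Nat → List Int) (num : Int) :
    (List.range K).foldl
        (fun (st : List (List Int) × Int) k =>
          (st.1.set k ((st.1.getD k []).set jn st.2), st.2 + 1))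
        ((List.range M).map f, num)
      = ((List.range M).map (fun i => if i < K then (f i).set jn (num + i) else f i), num + K) := by
  induction K with
  | zero => simp
  | succ K ih =>
    rw [List.range_succ, List.foldl_append, ih (by omega)]
    simp only [List.foldl_cons, List.foldl_nil]
    have hKM : K < M := by omega
    have hgetD : (((List.range M).map (fun i => if i < K then (f i).set jn (num + i) else f i)).getD K []) = f K := by
      rw [List.getD_eq_getElem?_getD, List.getElem?_map, List.getElem?_range hKM]
      simp
    rw [hgetD, pv_set_map_range, Prod.mk.injEq]
    constructor
    · apply List.map_congr_left
      intro j hj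
      by_cases hjK : j = K
      · subst hjK; simp
      · by_cases hjlt : j < K
        · rw [if_neg hjK, if_pos hjlt, if_pos (by omega)]
        · rw [if_neg hjK, if_neg hjlt, if_neg (by omega)]
    · push_cast; ring

-- outer loop over the first C even columns (column of the c-th pass is 2*c)
theorem pv_outer (M N : Nat) (C : Nat) :
    (List.range C).foldl
        (fun (st : List (List Int) × Int) c =>
          (List.range M).foldl
            (fun (st2 : List (List Int) × Int) k =>
              (st2.1.set k ((st2.1.getD k []).set (2 * c) st2.2), st2.2 + 1))
            st)
        ((List.range M).map (fun _ => (List.range N).map (fun _ => (0 : Int))), 1)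
      = ((List.range M).map (fun i =>
            (List.range N).map (fun j =>
              if j % 2 = 0 ∧ j / 2 < C then 1 + ((j / 2 : Nat) : Int) * (M : Nat) + (i : Nat) else 0)),
          1 + (C : Int) * (M : Nat)) := by
  induction C with
  | zero => simp
  | succ C ih =>
    rw [List.range_succ, List.foldl_append, ih]
    simp only [List.foldl_cons, List.foldl_nil]
    rw [pv_inner (2 * C) M M le_rfl, Prod.mk.injEq]
    constructor
    · apply List.map_congr_left
      intro i hi
      simp only [List.mem_range] at hi
      rw [if_pos hi, pv_set_map_range]
      apply List.map_congr_left
      intro j hj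
      simp only [List.mem_range] at hj
      by_cases hje : j = 2 * C
      · subst hje
        rw [if_pos rfl, if_pos ⟨by omega, by omega⟩]
        have h2 : (2 * C) / 2 = C := by omega
        rw [h2]
      · rw [if_neg hje]
        by_cases h1 : j % 2 = 0 ∧ j / 2 < C
        · rw [if_pos h1, if_pos ⟨h1.1, by omega⟩]
        · rw [if_neg h1, if_neg (by intro h; exact h1 ⟨h.1, by omega⟩)]
    · push_cast; ring

-- the two PySem integer primitives on a nonnegative numerator
theorem pv_mod_cast (j : Nat) : PySem.Int.mod (j : Int) 2 = ((j % 2 : Nat) : Int) := by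
  simp only [PySem.Int.mod]
  rw [Int.fmod_eq_emod, if_pos (Or.inl (by norm_num : (0 : Int) ≤ 2))]
  omega

theorem pv_fdiv_cast (j : Nat) : PySem.Int.floordiv (j : Int) 2 = ((j / 2 : Nat) : Int) := by
  simp only [PySem.Int.floordiv]
  rw [Int.fdiv_eq_ediv, if_pos (Or.inl (by norm_num : (0 : Int) ≤ 2))]
  omega

theorem pv_toNat_two_mul (c : Nat) : ((2 : Int) * (c : Nat)).toNat = 2 * c := by omega

-- ===== VERDICT (by name: the statement is the Claim_ definition above) =====
theorem every_other_column_spec : Claim_equal_every_other_column := by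
  intro m n _
  unfold Spec_every_other_column every_other_column every_other_column_alt
  by_cases hm : m ≤ 0
  · rw [PySem.List.pyRange_one_eq_nil hm]
    simp
  · push Not at hm
    rw [PySem.List.pyRange_one (0 : Int) m]
    by_cases hn : n ≤ 0
    · rw [PySem.List.pyRange_one_eq_nil hn,
        PySem.List.pyRange_of_pos 0 n (s := 2) (by norm_num), if_neg (by omega)]
      simp [List.map_map, Function.comp_def]
    · push Not at hn
      rw [PySem.List.pyRange_one (0 : Int) n,
        PySem.List.pyRange_of_pos 0 n (s := 2) (by norm_num), if_pos (by omega)]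
      simp only [Int.sub_zero, Int.zero_add, List.foldl_map, List.map_map, Function.comp_def,
        Int.toNat_natCast, pv_toNat_two_mul]
      rw [pv_outer m.toNat n.toNat ((n + 2 - 1) / 2).toNat]
      apply List.map_congr_left
      intro i hi
      apply List.map_congr_left
      intro j hj
      simp only [List.mem_range] at hi hj
      rw [pv_mod_cast, pv_fdiv_cast]
      have hm' : ((m.toNat : Nat) : Int) = m := by omega
      by_cases hje : j % 2 = 0
      · rw [if_pos ⟨hje, by omega⟩, if_pos (by exact_mod_cast congrArg (Nat.cast (R := Int)) hje)]
        rw [hm']; ring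
      · rw [if_neg (by intro h; exact hje h.1), if_neg (by intro h; apply hje; omega)]
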